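-- pv_equiv track=rewrite | github.com/itlezy/eMule-tooling | helpers/source-normalizer.py | normalize_text_content
-- ===== SOURCE A (Python) =====
-- def normalize_text_content(
--     text: str,
--     trim_trailing_whitespace: bool,
--     insert_final_newline: bool,
--     end_of_line: str,
-- ) -> str:
--     """Apply whitespace, final newline, and EOL normalization to decoded text."""
--
--     normalized = text.replace("\r\n", "\n").replace("\r", "\n")
--
--     if trim_trailing_whitespace:
--         normalized = "\n".join(line.rstrip(" \t") for line in normalized.split("\n"))
--
--     if insert_final_newline:
--         if normalized:
--             normalized = normalized.rstrip("\n") + "\n"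
--     else:
--         normalized = normalized.rstrip("\n")
--
--     if end_of_line == "crlf":
--         normalized = normalized.replace("\n", "\r\n")
--     elif end_of_line == "lf":
--         normalized = normalized.replace("\r\n", "\n")
--
--     return normalized
-- ===== SOURCE B (Python) =====
-- def normalize_text_content(
--     text: str,
--     trim_trailing_whitespace: bool,
--     insert_final_newline: bool,
--     end_of_line: str,
-- ) -> str:
--     """List-of-lines decomposition: scan once into lines, then join with the
--     target separator directly (no chained replace/rstrip over one big string)."""
--
--     # one pass over the characters, splitting at \r\n, \r or \n
--     lines = [[]]
--     i = 0
--     n = len(text)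
--     while i < n:
--         ch = text[i]
--         if ch == "\r":
--             if i + 1 < n and text[i + 1] == "\n":
--                 i += 1
--             lines.append([])
--         elif ch == "\n":
--             lines.append([])
--         else:
--             lines[-1].append(ch)
--         i += 1
--     strs = ["".join(l) for l in lines]
--
--     if trim_trailing_whitespace:
--         strs = [s.rstrip(" \t") for s in strs]
--
--     sep = "\r\n" if end_of_line == "crlf" else "\n"
--
--     # drop trailing empty lines
--     k = len(strs)
--     while k > 0 and strs[k - 1] == "":
--         k -= 1
--     core = strs[:k]
--
--     if insert_final_newline:
--         if strs == [""]:
--             return ""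
--         return sep.join(core) + sep
--     return sep.join(core)
-- ===== Notes on version B (the rewrite author's own statement) =====
-- stated objective: alternative
-- what changed: B replaces A's chain of whole-string replace/rstrip passes by a single character scan that splits the text into a list of lines, then reconstructs the output once by joining the (trailing-empty-dropped) lines with the target separator directly, so the final EOL replace pass disappears.
import Mathlib
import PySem

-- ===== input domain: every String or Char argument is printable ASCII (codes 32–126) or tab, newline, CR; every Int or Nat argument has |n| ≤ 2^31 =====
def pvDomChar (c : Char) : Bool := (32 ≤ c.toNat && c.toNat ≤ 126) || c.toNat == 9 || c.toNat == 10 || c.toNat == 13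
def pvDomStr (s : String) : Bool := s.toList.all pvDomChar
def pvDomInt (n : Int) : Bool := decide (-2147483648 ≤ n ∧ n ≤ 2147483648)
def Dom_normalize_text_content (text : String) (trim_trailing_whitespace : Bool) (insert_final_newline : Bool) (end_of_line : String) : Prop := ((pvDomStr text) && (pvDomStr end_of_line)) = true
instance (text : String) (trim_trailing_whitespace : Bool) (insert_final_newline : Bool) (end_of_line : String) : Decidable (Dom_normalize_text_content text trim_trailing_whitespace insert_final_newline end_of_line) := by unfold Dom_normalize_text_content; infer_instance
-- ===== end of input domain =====

-- ===== PORT A =====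
-- B restructures A as a single scan into a list of lines joined with the target separator; objective: alternative decomposition (same cost).
-- str.rstrip(" \t") : hand port (PySem has no rstrip-with-chars); exact: drops trailing ' ' and '\t'.
def rstripST (l : List Char) : List Char := (l.reverse.dropWhile (fun c => c == ' ' || c == '\t')).reverse

-- str.rstrip("\n") : hand port; exact: drops trailing '\n'.
def rstripNL (l : List Char) : List Char := (l.reverse.dropWhile (fun c => c == '\n')).reverse

def normalize_text_content (text : String) (trim_trailing_whitespace : Bool) (insert_final_newline : Bool) (end_of_line : String) : String :=
  let normalized := PySem.Chars.replace (PySem.Chars.replace text.toList ['\r', '\n'] ['\n']) ['\r'] ['\n']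
  let normalized := if trim_trailing_whitespace then
      PySem.Chars.join ['\n'] ((PySem.Chars.splitOn normalized ['\n']).map rstripST)
    else normalized
  let normalized := if insert_final_newline then
      (if normalized ≠ [] then rstripNL normalized ++ ['\n'] else normalized)
    else rstripNL normalized
  let normalized := if end_of_line = "crlf" then PySem.Chars.replace normalized ['\n'] ['\r', '\n']
    else if end_of_line = "lf" then PySem.Chars.replace normalized ['\r', '\n'] ['\n']
    else normalized
  String.mk normalized

-- ===== PORT B =====
-- the single scan of Source B: split at "\r\n", "\r" or "\n" into a list of lines
def bLines : List Char → List (List Char)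
  | [] => [[]]
  | '\r' :: '\n' :: rest => [] :: bLines rest
  | '\r' :: rest => [] :: bLines rest
  | '\n' :: rest => [] :: bLines rest
  | c :: rest =>
    match bLines rest with
    | l :: ls => (c :: l) :: ls
    | [] => [[c]]

def normalize_text_content_alt (text : String) (trim_trailing_whitespace : Bool) (insert_final_newline : Bool) (end_of_line : String) : String :=
  let strs := bLines text.toList
  let strs := if trim_trailing_whitespace then strs.map rstripST else strs
  let sep : List Char := if end_of_line = "crlf" then ['\r', '\n'] else ['\n']
  let core := (strs.reverse.dropWhile (fun l => l == ([] : List Char))).reverse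
  if insert_final_newline then
    (if strs = [[]] then "" else String.mk (PySem.Chars.join sep core ++ sep))
  else String.mk (PySem.Chars.join sep core)

-- ===== PRECONDITION & SPEC =====
def Spec_normalize_text_content (text : String) (trim_trailing_whitespace : Bool) (insert_final_newline : Bool) (end_of_line : String) (out : String) : Prop := out = normalize_text_content_alt text trim_trailing_whitespace insert_final_newline end_of_line
instance (text : String) (trim_trailing_whitespace : Bool) (insert_final_newline : Bool) (end_of_line : String) (out : String) : Decidable (Spec_normalize_text_content text trim_trailing_whitespace insert_final_newline end_of_line out) := by unfold Spec_normalize_text_content; infer_instance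

-- ===== CLAIM (what is proved, stated in full; the proofs are below) =====
def Claim_equal_normalize_text_content : Prop := ∀ (text : String) (trim_trailing_whitespace : Bool) (insert_final_newline : Bool) (end_of_line : String), Dom_normalize_text_content text trim_trailing_whitespace insert_final_newline end_of_line → Spec_normalize_text_content text trim_trailing_whitespace insert_final_newline end_of_line (normalize_text_content text trim_trailing_whitespace insert_final_newline end_of_line)

-- ===== LEMMAS AND PROOFS =====


-- natural recursions describing A's primitives
def step1 : List Char → List Char
  | [] => []
  | '\r' :: '\n' :: r => '\n' :: step1 r
  | c :: r => c :: step1 r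

def cr2nl (c : Char) : Char := if c == '\r' then '\n' else c

def nlExp (c : Char) : List Char := if c == '\n' then ['\r', '\n'] else [c]

def splitN : List Char → List (List Char)
  | [] => [[]]
  | '\n' :: r => [] :: splitN r
  | c :: r =>
    match splitN r with
    | l :: ls => (c :: l) :: ls
    | [] => [[c]]

def dte : List (List Char) → List (List Char)
  | [] => []
  | a :: r =>
    match dte r with
    | [] => if a = [] then [] else [a]
    | x :: t => a :: x :: t

lemma step1_cons_ne {c : Char} {t : List Char} (h : ¬ List.isPrefixOf ['\r', '\n'] (c :: t)) :
    step1 (c :: t) = c :: step1 t := by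
  rw [step1.eq_def]; split <;> simp_all [List.isPrefixOf]

lemma goA (fuel : Nat) : ∀ (l acc : List Char), l.length ≤ fuel →
    PySem.Chars.replace.go ['\r', '\n'] ['\n'] fuel l acc = acc.reverse ++ step1 l := by
  induction fuel with
  | zero =>
    intro l acc h
    have : l = [] := List.eq_nil_of_length_eq_zero (Nat.le_zero.mp h)
    subst this
    simp [PySem.Chars.replace.go, step1]
  | succ n ih =>
    intro l acc h
    match l with
    | [] => simp [PySem.Chars.replace.go, step1]
    | c :: t =>
      rw [PySem.Chars.replace.go]
      by_cases hp : List.isPrefixOf ['\r', '\n'] (c :: t)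
      · simp only [hp, if_true]
        obtain ⟨u, hu⟩ := List.isPrefixOf_iff_prefix.mp hp
        rw [← hu]
        have hlen : u.length ≤ n := by
          have := congrArg List.length hu
          simp at this h
          omega
        rw [show List.drop (List.length ['\r','\n']) (['\r','\n'] ++ u) = u by simp]
        rw [ih u _ hlen]
        simp [step1]
      · simp only [hp, if_false]
        have ht : t.length ≤ n := by simp at h; omega
        rw [ih t _ ht, step1_cons_ne hp]
        simp

lemma goB (fuel : Nat) : ∀ (l acc : List Char), l.length ≤ fuel →
    PySem.Chars.replace.go ['\r'] ['\n'] fuel l acc = acc.reverse ++ l.map cr2nl := by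
  induction fuel with
  | zero =>
    intro l acc h
    have : l = [] := List.eq_nil_of_length_eq_zero (Nat.le_zero.mp h)
    subst this
    simp [PySem.Chars.replace.go]
  | succ n ih =>
    intro l acc h
    match l with
    | [] => simp [PySem.Chars.replace.go]
    | c :: t =>
      rw [PySem.Chars.replace.go]
      have ht : t.length ≤ n := by simp at h; omega
      by_cases hc : c = '\r'
      · subst hc
        rw [if_pos (by simp [List.isPrefixOf])]
        rw [show List.drop (List.length ['\r']) ('\r' :: t) = t by simp]
        rw [ih t _ ht]
        simp [cr2nl]
      · rw [if_neg (by simp [List.isPrefixOf]; intro h'; exact hc h'.symm)]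
        rw [ih t _ ht]
        simp [cr2nl, hc]

lemma goC (fuel : Nat) : ∀ (l acc : List Char), l.length ≤ fuel →
    PySem.Chars.replace.go ['\n'] ['\r', '\n'] fuel l acc = acc.reverse ++ l.flatMap nlExp := by
  induction fuel with
  | zero =>
    intro l acc h
    have : l = [] := List.eq_nil_of_length_eq_zero (Nat.le_zero.mp h)
    subst this
    simp [PySem.Chars.replace.go]
  | succ n ih =>
    intro l acc h
    match l with
    | [] => simp [PySem.Chars.replace.go]
    | c :: t =>
      rw [PySem.Chars.replace.go]
      have ht : t.length ≤ n := by simp at h; omega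
      by_cases hc : c = '\n'
      · subst hc
        rw [if_pos (by simp [List.isPrefixOf])]
        rw [show List.drop (List.length ['\n']) ('\n' :: t) = t by simp]
        rw [ih t _ ht]
        simp [nlExp]
      · rw [if_neg (by simp [List.isPrefixOf]; intro h'; exact hc h'.symm)]
        rw [ih t _ ht]
        simp [nlExp, hc]

lemma step1_of_no_cr {l : List Char} (h : '\r' ∉ l) : step1 l = l := by
  induction l with
  | nil => simp [step1]
  | cons c t ih =>
    have hc : c ≠ '\r' := by intro hc; exact h (hc ▸ List.mem_cons_self ..)
    rw [step1_cons_ne (by cases t <;> simp [List.isPrefixOf, hc] <;> intro h' <;> exact absurd h'.symm hc)]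
    rw [ih (fun hm => h (List.mem_cons_of_mem _ hm))]
lemma replA (l : List Char) : PySem.Chars.replace l ['\r', '\n'] ['\n'] = step1 l := by
  rw [PySem.Chars.replace, if_neg (by simp)]
  simpa using goA l.length l [] le_rfl

lemma replB (l : List Char) : PySem.Chars.replace l ['\r'] ['\n'] = l.map cr2nl := by
  rw [PySem.Chars.replace, if_neg (by simp)]
  simpa using goB l.length l [] le_rfl

lemma replC (l : List Char) : PySem.Chars.replace l ['\n'] ['\r', '\n'] = l.flatMap nlExp := by
  rw [PySem.Chars.replace, if_neg (by simp)]
  simpa using goC l.length l [] le_rfl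

lemma splitN_ne_nil (l : List Char) : splitN l ≠ [] := by
  rw [splitN.eq_def]
  split
  · simp
  · simp
  · split <;> simp

lemma splitN_cons_ne {c : Char} (hc : c ≠ '\n') (r : List Char) :
    splitN (c :: r) = (c :: (splitN r).headI) :: (splitN r).tail := by
  obtain ⟨h, t, hht⟩ : ∃ h t, splitN r = h :: t := by
    cases hsr : splitN r with
    | nil => exact absurd hsr (splitN_ne_nil r)
    | cons h t => exact ⟨h, t, rfl⟩
  rw [splitN.eq_def]
  split
  · simp_all
  · next heq => rw [List.cons.injEq] at heq; exact absurd heq.1 hc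
  · next c' r' x heq =>
    rw [List.cons.injEq] at heq
    obtain ⟨rfl, rfl⟩ := heq
    rw [hht]
    simp

lemma bLines_ne_nil (cs : List Char) : bLines cs ≠ [] := by
  rw [bLines.eq_def]
  split
  · simp
  · simp
  · simp
  · simp
  · split <;> simp

lemma bLines_cons_ne {c : Char} (hc1 : c ≠ '\r') (hc2 : c ≠ '\n') (r : List Char) :
    bLines (c :: r) = (c :: (bLines r).headI) :: (bLines r).tail := by
  obtain ⟨h, t, hht⟩ : ∃ h t, bLines r = h :: t := by
    cases hsr : bLines r with
    | nil => exact absurd hsr (bLines_ne_nil r)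
    | cons h t => exact ⟨h, t, rfl⟩
  rw [bLines.eq_def]
  split
  · simp_all
  · next heq => rw [List.cons.injEq] at heq; exact absurd heq.1 hc1
  · next heq => rw [List.cons.injEq] at heq; exact absurd heq.1 hc1
  · next heq => rw [List.cons.injEq] at heq; exact absurd heq.1 hc2
  · next x c' r' heq =>
    rw [List.cons.injEq] at heq
    obtain ⟨rfl, rfl⟩ := heq
    rw [hht]
    simp

lemma goSplit (fuel : Nat) : ∀ (l cur : List Char) (acc : List (List Char)), l.length < fuel →
    PySem.Chars.splitOn.go ['\n'] fuel l cur acc =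
      acc.reverse ++ ((cur.reverse ++ (splitN l).headI) :: (splitN l).tail) := by
  induction fuel with
  | zero => intro l cur acc h; omega
  | succ n ih =>
    intro l cur acc h
    match l with
    | [] => simp [PySem.Chars.splitOn.go, splitN]
    | c :: t =>
      rw [PySem.Chars.splitOn.go]
      have ht : t.length < n := by simp at h; omega
      by_cases hc : c = '\n'
      · subst hc
        rw [if_pos (by simp [List.isPrefixOf])]
        rw [show List.drop (List.length ['\n']) ('\n' :: t) = t by simp]
        rw [ih t [] _ ht]
        obtain ⟨h', t', hht⟩ : ∃ h' t', splitN t = h' :: t' := by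
          cases hsr : splitN t with
          | nil => exact absurd hsr (splitN_ne_nil t)
          | cons h' t' => exact ⟨h', t', rfl⟩
        simp [splitN, hht]
      · rw [if_neg (by simp [List.isPrefixOf]; intro h'; exact hc h'.symm)]
        rw [ih t (c :: cur) _ ht, splitN_cons_ne hc]
        simp

lemma splitOn_eq (l : List Char) : PySem.Chars.splitOn l ['\n'] = splitN l := by
  rw [PySem.Chars.splitOn, goSplit (l.length + 1) l [] [] (by omega)]
  obtain ⟨h, t, hht⟩ : ∃ h t, splitN l = h :: t := by
    cases hsr : splitN l with
    | nil => exact absurd hsr (splitN_ne_nil l)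
    | cons h t => exact ⟨h, t, rfl⟩
  simp [hht]
def nrm (cs : List Char) : List Char := (step1 cs).map cr2nl

lemma replace_eq_nrm (cs : List Char) :
    PySem.Chars.replace (PySem.Chars.replace cs ['\r', '\n'] ['\n']) ['\r'] ['\n'] = nrm cs := by
  rw [replA, replB, nrm]

lemma bLines_cr {rest : List Char} (h : ∀ r, rest ≠ '\n' :: r) :
    bLines ('\r' :: rest) = [] :: bLines rest := by
  rw [bLines.eq_def]
  split
  · simp_all
  · simp_all
  · simp_all
  · simp_all
  · rename_i x1 x2 heq
    rw [List.cons.injEq] at heq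
    exact absurd heq.1.symm x1

lemma splitN_nrm (cs : List Char) : splitN (nrm cs) = bLines cs := by
  induction cs using bLines.induct with
  | case1 => simp [nrm, step1, splitN, bLines]
  | case2 rest ih =>
    have hn : nrm ('\r' :: '\n' :: rest) = '\n' :: nrm rest := by simp [nrm, step1, cr2nl]
    rw [hn]
    simp [splitN, bLines, ih]
  | case3 rest h ih =>
    have hpre : ¬ List.isPrefixOf ['\r', '\n'] ('\r' :: rest) := by
      cases rest with
      | nil => simp [List.isPrefixOf]
      | cons d r =>
        simp [List.isPrefixOf]
        intro hd
        exact absurd (hd ▸ rfl) (h r)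
    have hn : nrm ('\r' :: rest) = '\n' :: nrm rest := by
      rw [nrm, step1_cons_ne hpre]; simp [cr2nl, nrm]
    rw [hn, bLines_cr (fun r hr => h r hr)]
    simp [splitN, ih]
  | case4 rest ih =>
    have hn : nrm ('\n' :: rest) = '\n' :: nrm rest := by
      rw [nrm, step1_cons_ne (by simp [List.isPrefixOf])]; simp [cr2nl, nrm]
    rw [hn]
    simp [splitN, bLines, ih]
  | case5 c rest h1 h2 h3 l ls hbl ih =>
    have hc1 : c ≠ '\r' := fun hc => h2 hc
    have hc2 : c ≠ '\n' := fun hc => h3 hc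
    have hn : nrm (c :: rest) = c :: nrm rest := by
      rw [nrm, step1_cons_ne (by
        cases rest with
        | nil => simp [List.isPrefixOf, hc1]
        | cons d r => simp [List.isPrefixOf]; exact fun h => absurd h.symm hc1)]
      simp [cr2nl, hc1, nrm]
    rw [hn, splitN_cons_ne hc2, bLines_cons_ne hc1 hc2, ih]
  | case6 c rest h1 h2 h3 hbl ih =>
    exact absurd hbl (bLines_ne_nil rest)
lemma join_cons_head (c : Char) (h : List Char) (t : List (List Char)) :
    PySem.Chars.join ['\n'] ((c :: h) :: t) = c :: PySem.Chars.join ['\n'] (h :: t) := by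
  cases t with
  | nil => simp [PySem.Chars.join_singleton]
  | cons y t => rw [PySem.Chars.join_cons_cons, PySem.Chars.join_cons_cons]; simp

lemma join_splitN (l : List Char) : PySem.Chars.join ['\n'] (splitN l) = l := by
  induction l using splitN.induct with
  | case1 => simp [splitN, PySem.Chars.join_singleton]
  | case2 r ih =>
    obtain ⟨h, t, hht⟩ : ∃ h t, splitN r = h :: t := by
      cases hsr : splitN r with
      | nil => exact absurd hsr (splitN_ne_nil r)
      | cons h t => exact ⟨h, t, rfl⟩
    rw [show splitN ('\n' :: r) = [] :: splitN r by simp [splitN], hht,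
      PySem.Chars.join_cons_cons]
    rw [hht] at ih
    simp [ih]
  | case3 c r hc l ls hls ih =>
    have hc' : c ≠ '\n' := by
      intro h; exact hc h
    rw [splitN_cons_ne hc', hls]
    simp only [List.headI, List.tail]
    rw [join_cons_head]
    rw [hls] at ih
    rw [ih]
  | case4 c r hc hls ih => exact absurd hls (splitN_ne_nil r)

lemma dte_cons (a : List Char) (r : List (List Char)) :
    dte (a :: r) = match dte r with
      | [] => if a = [] then [] else [a]
      | x :: t => a :: x :: t := by
  rw [dte.eq_def]

lemma bLines_mem (cs : List Char) : ∀ l ∈ bLines cs, '\n' ∉ l ∧ '\r' ∉ l := by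
  induction cs using bLines.induct with
  | case1 => simp [bLines]
  | case2 rest ih => simpa [bLines] using ih
  | case3 rest h ih =>
    rw [bLines_cr (fun r hr => h r hr)]
    simpa using ih
  | case4 rest ih => simpa [bLines] using ih
  | case5 c rest h1 h2 h3 l ls hbl ih =>
    have hc1 : c ≠ '\r' := fun hc => h2 hc
    have hc2 : c ≠ '\n' := fun hc => h3 hc
    rw [bLines_cons_ne hc1 hc2, hbl]
    simp only [List.headI, List.tail_cons]
    rw [hbl] at ih
    intro x hx
    rcases List.mem_cons.mp hx with rfl | hx'
    · have := ih l (by simp)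
      constructor
      · intro hm
        rcases List.mem_cons.mp hm with h' | h'
        · exact hc2 h'.symm
        · exact this.1 h'
      · intro hm
        rcases List.mem_cons.mp hm with h' | h'
        · exact hc1 h'.symm
        · exact this.2 h'
    · exact ih x (List.mem_cons_of_mem _ hx')
  | case6 c rest h1 h2 h3 hbl ih => exact absurd hbl (bLines_ne_nil rest)

lemma rstripST_subset {c : Char} {l : List Char} (h : c ∈ rstripST l) : c ∈ l := by
  rw [rstripST] at h
  rw [List.mem_reverse] at h
  have := (List.dropWhile_sublist (l := l.reverse) (p := fun c => c == ' ' || c == '\t')).mem h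
  simpa using this

lemma dte_subset {x : List Char} {ls : List (List Char)} (h : x ∈ dte ls) : x ∈ ls := by
  induction ls with
  | nil => simp [dte] at h
  | cons a r ih =>
    rw [dte_cons] at h
    revert h
    cases hdr : dte r with
    | nil =>
      intro h
      by_cases ha : a = []
      · simp [ha] at h
      · rw [if_neg ha] at h
        rcases List.mem_singleton.mp h with rfl
        simp
    | cons y t =>
      intro h
      rcases List.mem_cons.mp h with rfl | h'
      · simp
      · exact List.mem_cons_of_mem _ (ih (hdr ▸ h'))
lemma dte_eq (ls : List (List Char)) :
    (ls.reverse.dropWhile (fun l => l == ([] : List Char))).reverse = dte ls := by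
  induction ls with
  | nil => simp [dte]
  | cons a r ih =>
    have ih' : r.reverse.dropWhile (fun l => l == ([] : List Char)) = (dte r).reverse := by
      rw [← ih]; simp
    rw [dte_cons]
    simp only [List.reverse_cons]
    rw [List.dropWhile_append, ih']
    cases hdr : dte r with
    | nil =>
      simp only [List.reverse_nil, List.isEmpty_nil, if_true]
      by_cases ha : a = []
      · simp [ha]
      · have hae : a.isEmpty = false := by simpa [List.isEmpty_iff] using ha
        simp [List.dropWhile, hae, ha]
    | cons y t =>
      have : ((dte r).reverse).isEmpty = false := by
        rw [hdr]; simp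
      simp

lemma rstripNL_append (u v : List Char) :
    rstripNL (u ++ v) = if rstripNL v = [] then rstripNL u else u ++ rstripNL v := by
  simp only [rstripNL, List.reverse_append, List.dropWhile_append]
  by_cases h : (v.reverse.dropWhile (fun c => c == '\n')) = []
  · simp [h]
  · have h2 : (v.reverse.dropWhile (fun c => c == '\n')).isEmpty = false := by
      simpa [List.isEmpty_iff] using h
    have h3 : ¬ ((v.reverse.dropWhile (fun c => c == '\n')).reverse = []) := by
      simpa using h
    simp [h2, h3]

lemma rstripNL_of_not_mem {a : List Char} (h : '\n' ∉ a) : rstripNL a = a := by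
  rw [rstripNL]
  cases har : a.reverse with
  | nil => simpa using congrArg List.reverse har
  | cons c t =>
    have hc : c ∈ a := by rw [← List.mem_reverse, har]; simp
    have : (c == '\n') = false := by
      simp only [beq_eq_false_iff_ne, ne_eq]
      intro hcc; exact h (hcc ▸ hc)
    rw [List.dropWhile_cons, this]
    simp [← har]

lemma dte_getLast {r : List (List Char)} {l : List Char} (h : (dte r).getLast? = some l) : l ≠ [] := by
  induction r with
  | nil => simp [dte] at h
  | cons a t ih =>
    rw [dte_cons] at h
    revert h
    cases hdt : dte t with
    | nil =>
      intro h
      by_cases ha : a = []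
      · simp [ha] at h
      · rw [if_neg ha] at h
        simp at h
        intro hl
        exact ha (by rw [h, hl])
    | cons y s =>
      intro h
      rw [List.getLast?_cons_cons] at h
      exact ih (hdt ▸ h)

lemma join_ne_nil_of_getLast {ls : List (List Char)}
    (h : ∀ l, ls.getLast? = some l → l ≠ []) (hne : ls ≠ []) :
    PySem.Chars.join ['\n'] ls ≠ [] := by
  induction ls with
  | nil => exact absurd rfl hne
  | cons a t ih =>
    cases t with
    | nil =>
      rw [PySem.Chars.join_singleton]
      exact h a (by simp)
    | cons b s =>
      rw [PySem.Chars.join_cons_cons]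
      intro hnil
      rcases List.append_eq_nil_iff.mp hnil with ⟨h1, _⟩
      rcases List.append_eq_nil_iff.mp h1 with ⟨_, h3⟩
      simp at h3

lemma join_dte_nil {r : List (List Char)} (h : PySem.Chars.join ['\n'] (dte r) = []) : dte r = [] := by
  by_contra hne
  exact join_ne_nil_of_getLast (fun l hl => dte_getLast hl) hne h
lemma rstripNL_join (ls : List (List Char)) (h : ∀ l ∈ ls, '\n' ∉ l) :
    rstripNL (PySem.Chars.join ['\n'] ls) = PySem.Chars.join ['\n'] (dte ls) := by
  induction ls with
  | nil => simp [PySem.Chars.join_nil, dte, rstripNL]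
  | cons a r ih =>
    have ha : '\n' ∉ a := h a (by simp)
    have hr : ∀ l ∈ r, '\n' ∉ l := fun l hl => h l (List.mem_cons_of_mem _ hl)
    cases r with
    | nil =>
      rw [PySem.Chars.join_singleton, rstripNL_of_not_mem ha, dte_cons]
      simp only [dte]
      by_cases hae : a = []
      · simp [hae, PySem.Chars.join_nil]
      · rw [if_neg hae, PySem.Chars.join_singleton]
    | cons b t =>
      have ih' := ih hr
      rw [PySem.Chars.join_cons_cons]
      rw [show a ++ ['\n'] ++ PySem.Chars.join ['\n'] (b :: t)
            = a ++ (['\n'] ++ PySem.Chars.join ['\n'] (b :: t)) by simp]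
      rw [rstripNL_append a (['\n'] ++ PySem.Chars.join ['\n'] (b :: t))]
      rw [rstripNL_append ['\n'] (PySem.Chars.join ['\n'] (b :: t))]
      by_cases hJ : rstripNL (PySem.Chars.join ['\n'] (b :: t)) = []
      · have hnl : rstripNL ['\n'] = [] := by simp [rstripNL, List.dropWhile]
        rw [if_pos hJ, if_pos hnl, rstripNL_of_not_mem ha]
        have hdte : dte (b :: t) = [] := join_dte_nil (ih' ▸ hJ)
        rw [dte_cons, hdte]
        by_cases hae : a = []
        · simp [hae, PySem.Chars.join_nil]
        · rw [if_neg hae, PySem.Chars.join_singleton]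
      · have hdte : dte (b :: t) ≠ [] := by
          intro hd
          rw [ih', hd, PySem.Chars.join_nil] at hJ
          exact hJ rfl
        simp only [if_neg hJ]
        rw [if_neg (by simp)]
        rw [ih']
        cases hd : dte (b :: t) with
        | nil => exact absurd hd hdte
        | cons y s =>
          rw [dte_cons, hd]
          simp [PySem.Chars.join_cons_cons]
lemma join_eq_nil_iff (ls : List (List Char)) (h : ls ≠ []) :
    PySem.Chars.join ['\n'] ls = [] ↔ ls = [[]] := by
  cases ls with
  | nil => exact absurd rfl h
  | cons a t =>
    cases t with
    | nil => simp [PySem.Chars.join_singleton]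
    | cons b s =>
      rw [PySem.Chars.join_cons_cons]
      constructor
      · intro hnil
        rcases List.append_eq_nil_iff.mp hnil with ⟨h1, _⟩
        rcases List.append_eq_nil_iff.mp h1 with ⟨_, h3⟩
        simp at h3
      · intro hh; simp at hh

lemma flatMap_nlExp_of_not_mem {a : List Char} (h : '\n' ∉ a) : a.flatMap nlExp = a := by
  induction a with
  | nil => simp
  | cons c t ih =>
    have hc : c ≠ '\n' := fun hc => h (hc ▸ List.mem_cons_self ..)
    rw [List.flatMap_cons, ih (fun hm => h (List.mem_cons_of_mem _ hm))]
    simp [nlExp, hc]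

lemma flatMap_nlExp_join (ls : List (List Char)) (h : ∀ l ∈ ls, '\n' ∉ l) :
    (PySem.Chars.join ['\n'] ls).flatMap nlExp = PySem.Chars.join ['\r', '\n'] ls := by
  induction ls with
  | nil => simp [PySem.Chars.join_nil]
  | cons a t ih =>
    have ha : '\n' ∉ a := h a (by simp)
    have ht : ∀ l ∈ t, '\n' ∉ l := fun l hl => h l (List.mem_cons_of_mem _ hl)
    cases t with
    | nil => rw [PySem.Chars.join_singleton, PySem.Chars.join_singleton, flatMap_nlExp_of_not_mem ha]
    | cons b s =>
      rw [PySem.Chars.join_cons_cons, PySem.Chars.join_cons_cons]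
      rw [List.flatMap_append, List.flatMap_append]
      rw [flatMap_nlExp_of_not_mem ha, ih ht]
      simp [nlExp]

lemma not_mem_join {ls : List (List Char)} (h : ∀ l ∈ ls, '\r' ∉ l) :
    '\r' ∉ PySem.Chars.join ['\n'] ls := by
  induction ls with
  | nil => simp [PySem.Chars.join_nil]
  | cons a t ih =>
    have ha : '\r' ∉ a := h a (by simp)
    have ht : ∀ l ∈ t, '\r' ∉ l := fun l hl => h l (List.mem_cons_of_mem _ hl)
    cases t with
    | nil => rw [PySem.Chars.join_singleton]; exact ha
    | cons b s =>
      rw [PySem.Chars.join_cons_cons]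
      intro hm
      rcases List.mem_append.mp hm with h1 | h2
      · rcases List.mem_append.mp h1 with h3 | h4
        · exact ha h3
        · simp at h4
      · exact ih ht h2
lemma stage34 (strs : List (List Char)) (hne : strs ≠ [])
    (hmem : ∀ l ∈ strs, '\n' ∉ l ∧ '\r' ∉ l) (ifn : Bool) (eol : String) :
    (let n3 := if ifn = true then
        (if PySem.Chars.join ['\n'] strs ≠ [] then rstripNL (PySem.Chars.join ['\n'] strs) ++ ['\n']
         else PySem.Chars.join ['\n'] strs)
      else rstripNL (PySem.Chars.join ['\n'] strs);
     let n4 := if eol = "crlf" then PySem.Chars.replace n3 ['\n'] ['\r', '\n']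
       else if eol = "lf" then PySem.Chars.replace n3 ['\r', '\n'] ['\n']
       else n3;
     String.mk n4)
    = (let sep : List Char := if eol = "crlf" then ['\r', '\n'] else ['\n'];
       let core := (strs.reverse.dropWhile (fun l => l == ([] : List Char))).reverse;
       if ifn = true then
         (if strs = [[]] then "" else String.mk (PySem.Chars.join sep core ++ sep))
       else String.mk (PySem.Chars.join sep core)) := by
  simp only []
  have hnl : ∀ l ∈ strs, '\n' ∉ l := fun l hl => (hmem l hl).1
  have hcr : ∀ l ∈ strs, '\r' ∉ l := fun l hl => (hmem l hl).2
  have hdnl : ∀ l ∈ dte strs, '\n' ∉ l := fun l hl => hnl l (dte_subset hl)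
  have hdcr : ∀ l ∈ dte strs, '\r' ∉ l := fun l hl => hcr l (dte_subset hl)
  have hr : rstripNL (PySem.Chars.join ['\n'] strs) = PySem.Chars.join ['\n'] (dte strs) :=
    rstripNL_join strs hnl
  have hjcr : '\r' ∉ PySem.Chars.join ['\n'] (dte strs) := not_mem_join hdcr
  rw [dte_eq]
  cases ifn with
  | false =>
    simp only [Bool.false_eq_true, if_false, hr]
    by_cases h1 : eol = "crlf"
    · rw [if_pos h1, if_pos h1, replC, flatMap_nlExp_join _ hdnl]
    · rw [if_neg h1, if_neg h1]
      by_cases h2 : eol = "lf"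
      · rw [if_pos h2, replA, step1_of_no_cr hjcr]
      · rw [if_neg h2]
  | true =>
    simp only [if_true]
    by_cases hjoin : PySem.Chars.join ['\n'] strs = []
    · have hstrs : strs = [[]] := (join_eq_nil_iff strs hne).mp hjoin
      subst hstrs
      rw [PySem.Chars.join_singleton]
      have hn3 : (if ([] : List Char) ≠ [] then rstripNL ([] : List Char) ++ ['\n'] else ([] : List Char)) = [] := by simp
      rw [hn3]
      by_cases h1 : eol = "crlf"
      · rw [if_pos h1, replC]; simp; rfl
      · rw [if_neg h1]
        by_cases h2 : eol = "lf"
        · rw [if_pos h2, replA]; simp [step1]; rfl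
        · rw [if_neg h2]; simp; rfl
    · have hstrs : strs ≠ [[]] := fun hs => hjoin ((join_eq_nil_iff strs hne).mpr hs)
      rw [if_pos (show PySem.Chars.join ['\n'] strs ≠ [] from hjoin), if_neg hstrs, hr]
      have hjcr' : '\r' ∉ PySem.Chars.join ['\n'] (dte strs) ++ ['\n'] := by
        intro hm
        rcases List.mem_append.mp hm with h' | h'
        · exact hjcr h'
        · simp at h'
      by_cases h1 : eol = "crlf"
      · rw [if_pos h1, if_pos h1, replC, List.flatMap_append, flatMap_nlExp_join _ hdnl]
        simp [nlExp]
      · rw [if_neg h1, if_neg h1]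
        by_cases h2 : eol = "lf"
        · rw [if_pos h2, replA, step1_of_no_cr hjcr']
        · rw [if_neg h2]

lemma nrm_eq_join (cs : List Char) :
    nrm cs = PySem.Chars.join ['\n'] (bLines cs) := by
  rw [← splitN_nrm, join_splitN]

-- ===== VERDICT (by name: the statement is the Claim_ definition above) =====
theorem normalize_text_content_spec : Claim_equal_normalize_text_content := by
  intro text tw ifn eol _
  unfold Spec_normalize_text_content
  simp only [normalize_text_content, normalize_text_content_alt, replace_eq_nrm, splitOn_eq,
    splitN_nrm]
  simp only [nrm_eq_join]
  cases tw with
  | false =>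
    simp only [Bool.false_eq_true, if_false]
    exact stage34 (bLines text.toList) (bLines_ne_nil _) (bLines_mem _) ifn eol
  | true =>
    simp only [if_true]
    refine stage34 ((bLines text.toList).map rstripST) (by simpa using bLines_ne_nil text.toList) ?_ ifn eol
    intro l hl
    rcases List.mem_map.mp hl with ⟨x, hx, rfl⟩
    have := bLines_mem text.toList x hx
    exact ⟨fun hm => this.1 (rstripST_subset hm), fun hm => this.2 (rstripST_subset hm)⟩
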